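-- pv_equiv track=rewrite | github.com/matthew-wong1/FaultFinder | faultfinder.py | parse_dawn_validation_error
-- ===== SOURCE A (Python) =====
-- def parse_dawn_validation_error(full_validation_error):
--     # dawn: [Queue].WriteBuffer()
--     formatted = ""
--
--     for char in full_validation_error:
--         if char == "(":
--             break
--
--         if char != "[" and char != "]":
--             formatted += char
--
--     return formatted
-- ===== SOURCE B (Python) =====
-- def parse_dawn_validation_error(full_validation_error):
--     # prefix before the first left parenthesis (whole string when there is none), then drop brackets
--     return full_validation_error.split("(")[0].replace("[", "").replace("]", "")
-- ===== Notes on version B (the rewrite author's own statement) =====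
-- stated objective: faster
-- what changed: Replaces the character-by-character accumulate-with-break loop by two library passes: take the prefix before the first left parenthesis via split, then delete both bracket characters via replace.
import Mathlib
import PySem

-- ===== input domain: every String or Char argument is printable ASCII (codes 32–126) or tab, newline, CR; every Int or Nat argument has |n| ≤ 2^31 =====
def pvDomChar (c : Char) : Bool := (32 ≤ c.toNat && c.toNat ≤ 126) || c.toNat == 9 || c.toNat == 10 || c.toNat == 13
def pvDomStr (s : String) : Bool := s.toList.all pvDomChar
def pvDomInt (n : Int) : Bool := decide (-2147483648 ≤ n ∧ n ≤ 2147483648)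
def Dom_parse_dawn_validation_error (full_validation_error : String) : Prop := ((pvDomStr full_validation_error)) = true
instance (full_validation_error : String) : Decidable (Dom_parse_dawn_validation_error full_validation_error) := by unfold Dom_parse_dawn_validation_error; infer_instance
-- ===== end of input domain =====

-- B replaces A's accumulate-with-break character loop by two library passes (split at '(' then strip brackets with replace); objective: simpler.

-- ===== PORT A =====
-- the for-loop with break: structural recursion over the remaining characters, same accumulator
def pvLoopA : List Char → String → String
  | [], formatted => formatted
  | c :: rest, formatted =>
    if c = '(' then formatted
    else if c ≠ '[' ∧ c ≠ ']' then pvLoopA rest (formatted.push c)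
    else pvLoopA rest formatted

def parse_dawn_validation_error (full_validation_error : String) : String :=
  pvLoopA full_validation_error.toList ""

-- ===== PORT B =====
def parse_dawn_validation_error_alt (full_validation_error : String) : String :=
  -- full_validation_error.split("(")[0]: split never raises (sep ≠ "") and always
  -- yields a non-empty list, so the getD defaults are unreachable
  let first := (PySem.List.pyGet? ((PySem.Str.split? full_validation_error "(").getD []) 0).getD ""
  PySem.Str.replace (PySem.Str.replace first "[" "") "]" ""

-- ===== PRECONDITION & SPEC =====
def Spec_parse_dawn_validation_error (full_validation_error : String) (out : String) : Prop := out = parse_dawn_validation_error_alt full_validation_error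
instance (full_validation_error : String) (out : String) : Decidable (Spec_parse_dawn_validation_error full_validation_error out) := by unfold Spec_parse_dawn_validation_error; infer_instance

-- ===== CLAIM (what is proved, stated in full; the proofs are below) =====
def Claim_equal_parse_dawn_validation_error : Prop := ∀ (full_validation_error : String), Dom_parse_dawn_validation_error full_validation_error → Spec_parse_dawn_validation_error full_validation_error (parse_dawn_validation_error full_validation_error)

-- ===== LEMMAS AND PROOFS =====

-- the first piece of splitOn with a one-char separator is the takeWhile-prefix
theorem pv_splitOn_go_single (c : Char) :
    ∀ (fuel : Nat) (l cur : List Char) (acc : List (List Char)), l.length ≤ fuel →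
      ∃ t, PySem.Chars.splitOn.go [c] fuel l cur acc
            = acc.reverse ++ (cur.reverse ++ l.takeWhile (fun a => !(a == c))) :: t := by
  intro fuel
  induction fuel with
  | zero =>
    intro l cur acc h
    have hl : l = [] := List.eq_nil_of_length_eq_zero (Nat.le_zero.mp h)
    subst hl
    exact ⟨[], by simp [PySem.Chars.splitOn.go]⟩
  | succ n ih =>
    intro l cur acc h
    cases l with
    | nil => exact ⟨[], by simp [PySem.Chars.splitOn.go]⟩
    | cons a rest =>
      by_cases hac : a = c
      · subst hac
        obtain ⟨t, ht⟩ := ih rest [] (cur.reverse :: acc) (by simpa using h)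
        refine ⟨rest.takeWhile (fun x => !(x == a)) :: t, ?_⟩
        simp [PySem.Chars.splitOn.go, List.isPrefixOf, ht]
      · have hca : ¬ c = a := fun e => hac e.symm
        have hb : (a == c) = false := by simp [hac]
        obtain ⟨t, ht⟩ := ih rest (a :: cur) acc (by simpa using Nat.le_of_succ_le_succ h)
        refine ⟨t, ?_⟩
        simp [PySem.Chars.splitOn.go, List.isPrefixOf, hca, ht, hb]

theorem pv_splitOn_single_head (s : List Char) (c : Char) :
    ∃ t, PySem.Chars.splitOn s [c] = (s.takeWhile (fun a => !(a == c))) :: t := by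
  obtain ⟨t, ht⟩ := pv_splitOn_go_single c (s.length + 1) s [] [] (Nat.le_succ _)
  exact ⟨t, by simpa [PySem.Chars.splitOn] using ht⟩

-- replace with one-char old and empty new is a filter
theorem pv_replace_go_del (b : Char) :
    ∀ (fuel : Nat) (l acc : List Char), l.length ≤ fuel →
      PySem.Chars.replace.go [b] [] fuel l acc
        = acc.reverse ++ l.filter (fun a => !(a == b)) := by
  intro fuel
  induction fuel with
  | zero =>
    intro l acc h
    have hl : l = [] := List.eq_nil_of_length_eq_zero (Nat.le_zero.mp h)
    subst hl
    simp [PySem.Chars.replace.go]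
  | succ n ih =>
    intro l acc h
    cases l with
    | nil => simp [PySem.Chars.replace.go]
    | cons a rest =>
      by_cases hab : a = b
      · subst hab
        simp [PySem.Chars.replace.go, List.isPrefixOf,
          ih rest acc (by simpa using h)]
      · have hba : ¬ b = a := fun e => hab e.symm
        have hb : (a == b) = false := by simp [hab]
        simp [PySem.Chars.replace.go, List.isPrefixOf, hba, hb,
          ih rest (a :: acc) (by simpa using Nat.le_of_succ_le_succ h)]

theorem pv_replace_del (l : List Char) (b : Char) :
    PySem.Chars.replace l [b] [] = l.filter (fun a => !(a == b)) := by
  simpa [PySem.Chars.replace] using pv_replace_go_del b l.length l [] (Nat.le_refl _)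

-- A's loop in closed form
theorem pvLoopA_eq (l : List Char) :
    ∀ acc : String, pvLoopA l acc
      = acc ++ String.ofList ((l.takeWhile (fun a => !(a == '('))).filter
          (fun a => !(a == '[') && !(a == ']'))) := by
  induction l with
  | nil => intro acc; simp [pvLoopA]
  | cons c rest ih =>
    intro acc
    by_cases h1 : c = '('
    · subst h1; simp [pvLoopA, List.takeWhile]
    · have hb1 : (c == '(') = false := by simp [h1]
      by_cases h2 : c = '['
      · subst h2; simp [pvLoopA, ih, hb1]
      · by_cases h3 : c = ']'
        · subst h3; simp [pvLoopA, ih, hb1]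
        · have hb2 : (c == '[') = false := by simp [h2]
          have hb3 : (c == ']') = false := by simp [h3]
          simp only [pvLoopA, if_neg h1, if_pos (And.intro h2 h3), ih]
          rw [← String.toList_inj]
          simp [hb1, hb2, hb3]

-- ===== VERDICT (by name: the statement is the Claim_ definition above) =====
theorem parse_dawn_validation_error_spec : Claim_equal_parse_dawn_validation_error := by
  intro s _
  unfold Spec_parse_dawn_validation_error parse_dawn_validation_error parse_dawn_validation_error_alt
  obtain ⟨t, ht⟩ := pv_splitOn_single_head s.toList '\u0028'
  rw [← String.toList_inj]
  simp [PySem.Str.split?, PySem.Chars.split?, ht, PySem.List.pyGet?, PySem.List.pyIdx?,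
    PySem.Str.replace, pv_replace_del, pvLoopA_eq, List.filter_filter]
  exact List.filter_congr (fun a _ => Bool.and_comm _ _)
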